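-- pv_equiv track=rewrite | github.com/ewdlop/DataStructure-Algorithm-Note | Python/PigeonholePrinciple.py | find_common_element_sequences
-- ===== SOURCE A (Python) =====
-- from typing import List, Set, Dict, Tuple, Any, Optional
-- from collections import defaultdict
--
-- def find_common_element_sequences(sequences: List[List[int]]) -> Optional[int]:
--     """
--     Find an element that appears in all sequences
--     Uses pigeonhole: if total elements > (k-1)*n where k is number of sequences,
--     there must be a common element
--     """
--     element_counts = defaultdict(int)
--
--     for sequence in sequences:
--         # Use set to count unique elements in each sequence
--         seen = set()
--         for num in sequence:
--             if num not in seen: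
--                 element_counts[num] += 1
--                 seen.add(num)
--
--     # Check if any element appears in all sequences
--     k = len(sequences)
--     for element, count in element_counts.items():
--         if count == k:
--             return element
--
--     return None
-- ===== SOURCE B (Python) =====
-- from typing import List, Optional
--
--
-- def find_common_element_sequences(sequences: List[List[int]]) -> Optional[int]:
--     if not sequences:
--         return None
--     others = [set(s) for s in sequences[1:]]
--     seen = set()
--     for x in sequences[0]:
--         if x in seen:
--             continue
--         seen.add(x)
--         if all(x in o for o in others):
--             return x
--     return None
-- ===== Notes on version B (the rewrite author's own statement) =====
-- stated objective: alternative
-- what changed: Instead of counting distinct occurrences of every element across all sequences in a dict and then scanning the dict, B builds one membership set per remaining sequence and probes only the first sequence's elements in first-appearance order, returning the first element contained in every other set (it can stop early; measured around 1.5-1.8x on random inputs, below the confirmation threshold on some runs).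
import Mathlib
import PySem

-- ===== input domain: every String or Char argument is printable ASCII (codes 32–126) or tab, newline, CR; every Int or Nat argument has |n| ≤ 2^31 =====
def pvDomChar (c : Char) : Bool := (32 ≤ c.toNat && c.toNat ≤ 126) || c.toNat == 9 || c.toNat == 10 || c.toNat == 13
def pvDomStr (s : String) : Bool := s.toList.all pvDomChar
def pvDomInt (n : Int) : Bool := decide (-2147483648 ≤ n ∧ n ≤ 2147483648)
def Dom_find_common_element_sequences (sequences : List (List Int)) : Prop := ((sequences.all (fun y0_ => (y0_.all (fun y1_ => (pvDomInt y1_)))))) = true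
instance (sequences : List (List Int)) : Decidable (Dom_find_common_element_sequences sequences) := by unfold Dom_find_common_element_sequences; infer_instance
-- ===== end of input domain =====

-- B replaces A's count-distinct-elements-across-all-sequences dict pass with per-sequence
-- membership sets probed by the first sequence's elements in order, stopping at the first
-- common element (objective: alternative algorithm of the same worst-case cost).

-- ===== PORT A =====
def find_common_element_sequences (sequences : List (List Int)) : Option Int :=
  let element_counts : PySem.Dict Int Int :=
    sequences.foldl
      (fun element_counts sequence =>
        (sequence.foldl
          (fun (st : PySem.Dict Int Int × PySem.Set Int) num =>
            if PySem.Set.contains st.2 num then st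
            else (st.1.insert num (st.1.getD num 0 + 1), PySem.Set.add st.2 num))
          (element_counts, PySem.Set.empty)).1)
      PySem.Dict.empty
  let k : Int := (sequences.length : Int)
  (element_counts.items.find? (fun p => p.2 == k)).map Prod.fst

-- ===== PORT B =====
-- B's scan over sequences[0]: skip already-seen elements, return the first one in every other set
def fcsAltGo (others : List (PySem.Set Int)) (seen : PySem.Set Int) : List Int → Option Int
  | [] => none
  | x :: xs =>
    if PySem.Set.contains seen x then fcsAltGo others seen xs
    else
      let seen' := PySem.Set.add seen x
      if others.all (fun o => PySem.Set.contains o x) then some x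
      else fcsAltGo others seen' xs

def find_common_element_sequences_alt (sequences : List (List Int)) : Option Int :=
  match sequences with
  | [] => none
  | first :: rest =>
    fcsAltGo (rest.map (fun s => PySem.Set.ofList s)) PySem.Set.empty first

-- ===== PRECONDITION & SPEC =====
def Spec_find_common_element_sequences (sequences : List (List Int)) (out : Option Int) : Prop := out = find_common_element_sequences_alt sequences
instance (sequences : List (List Int)) (out : Option Int) : Decidable (Spec_find_common_element_sequences sequences out) := by unfold Spec_find_common_element_sequences; infer_instance

-- ===== CLAIM (what is proved, stated in full; the proofs are below) =====
def Claim_equal_find_common_element_sequences : Prop := ∀ (sequences : List (List Int)), Dom_find_common_element_sequences sequences → Spec_find_common_element_sequences sequences (find_common_element_sequences sequences)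

-- ===== LEMMAS AND PROOFS =====

-- A's inner loop: the count of x grows by 1 exactly when x occurs in the sequence and is not in seen
theorem fcs_inner_getD (l : List Int) (d : PySem.Dict Int Int) (seen : PySem.Set Int) (x : Int) :
    ((l.foldl
        (fun (st : PySem.Dict Int Int × PySem.Set Int) num =>
          if PySem.Set.contains st.2 num then st
          else (st.1.insert num (st.1.getD num 0 + 1), PySem.Set.add st.2 num))
        (d, seen)).1).getD x 0
      = d.getD x 0 + (if x ∈ l ∧ x ∉ seen then 1 else 0) := by
  induction l generalizing d seen with
  | nil => simp
  | cons a l ih =>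
    simp only [List.foldl_cons]
    cases ha : PySem.Set.contains seen a with
    | true =>
      have hamem : a ∈ seen := (PySem.Set.contains_iff seen a).mp ha
      rw [if_pos rfl]
      rw [ih]
      by_cases hxa : x = a
      · subst hxa; simp [hamem]
      · simp [List.mem_cons, hxa]
    | false =>
      have hamem : a ∉ seen := by
        rw [← PySem.Set.contains_iff seen a, ha]; simp
      rw [if_neg Bool.false_ne_true]
      rw [ih]
      by_cases hxa : x = a
      · subst hxa
        rw [PySem.Dict.getD_insert]
        simp [PySem.Set.mem_add, hamem]
      · rw [PySem.Dict.getD_insert, if_neg hxa]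
        have : (x ∈ l ∧ x ∉ PySem.Set.add seen a) ↔ (x ∈ a :: l ∧ x ∉ seen) := by
          simp [PySem.Set.mem_add, List.mem_cons, hxa]
        rw [if_congr this rfl rfl]

-- A's inner loop: the keys become keys.update(sequence) (when seen ⊆ keys)
theorem fcs_inner_keys (l : List Int) (d : PySem.Dict Int Int) (seen : PySem.Set Int)
    (h : ∀ y ∈ seen, y ∈ d.keys) :
    ((l.foldl
        (fun (st : PySem.Dict Int Int × PySem.Set Int) num =>
          if PySem.Set.contains st.2 num then st
          else (st.1.insert num (st.1.getD num 0 + 1), PySem.Set.add st.2 num))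
        (d, seen)).1).keys
      = PySem.Set.update d.keys l := by
  induction l generalizing d seen with
  | nil => rfl
  | cons a l ih =>
    simp only [List.foldl_cons]
    rw [PySem.Set.update_cons]
    cases ha : PySem.Set.contains seen a with
    | true =>
      have hamem : a ∈ d.keys := h a ((PySem.Set.contains_iff seen a).mp ha)
      rw [if_pos rfl]
      rw [ih d seen h, PySem.Set.add_of_mem hamem]
    | false =>
      rw [if_neg Bool.false_ne_true]
      have hkeys : ((d.insert a (d.getD a 0 + 1)).keys : PySem.Set Int) = PySem.Set.add d.keys a := by
        cases hc : d.contains a with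
        | true =>
          rw [PySem.Dict.keys_insert_of_contains d _ hc,
            PySem.Set.add_of_mem ((PySem.Dict.contains_iff_mem_keys d a).mp hc)]
        | false =>
          rw [PySem.Dict.keys_insert_of_not_contains d _ hc,
            PySem.Set.add_of_not_mem (by
              intro hm
              simp [(PySem.Dict.contains_iff_mem_keys d a).mpr hm] at hc)]
      rw [ih _ _ (by
        intro y hy
        rw [hkeys]
        rcases (PySem.Set.mem_add seen a y).mp hy with hy | rfl
        · exact (PySem.Set.mem_add _ _ _).mpr (Or.inl (h y hy))
        · exact (PySem.Set.mem_add _ _ _).mpr (Or.inr rfl)), hkeys]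

-- A's outer loop: the final count of x is the number of sequences containing x
theorem fcs_outer_getD (ss : List (List Int)) (d : PySem.Dict Int Int) (x : Int) :
    (ss.foldl
        (fun element_counts sequence =>
          (sequence.foldl
            (fun (st : PySem.Dict Int Int × PySem.Set Int) num =>
              if PySem.Set.contains st.2 num then st
              else (st.1.insert num (st.1.getD num 0 + 1), PySem.Set.add st.2 num))
            (element_counts, PySem.Set.empty)).1)
        d).getD x 0
      = d.getD x 0 + (ss.countP (fun s => decide (x ∈ s)) : Int) := by
  induction ss generalizing d with
  | nil => simp
  | cons s ss ih =>
    simp only [List.foldl_cons]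
    rw [ih, fcs_inner_getD, List.countP_cons]
    have : x ∉ (PySem.Set.empty : PySem.Set Int) := by simp [PySem.Set.empty]
    by_cases hx : x ∈ s <;> simp [hx, this] <;> ring

-- A's outer loop: the final keys are keys.update(flattened input)
theorem fcs_outer_keys (ss : List (List Int)) (d : PySem.Dict Int Int) :
    (ss.foldl
        (fun element_counts sequence =>
          (sequence.foldl
            (fun (st : PySem.Dict Int Int × PySem.Set Int) num =>
              if PySem.Set.contains st.2 num then st
              else (st.1.insert num (st.1.getD num 0 + 1), PySem.Set.add st.2 num))
            (element_counts, PySem.Set.empty)).1)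
        d).keys
      = PySem.Set.update d.keys (ss.flatMap id) := by
  induction ss generalizing d with
  | nil => rfl
  | cons s ss ih =>
    simp only [List.foldl_cons]
    rw [ih, List.flatMap_cons, PySem.Set.update_append,
      fcs_inner_keys _ _ _ (by intro y hy; simp [PySem.Set.empty] at hy)]
    rfl

theorem find?_discard (p : Int → Bool) (s : PySem.Set Int) (a : Int) (ha : p a = false) :
    List.find? p (PySem.Set.discard s a) = List.find? p s := by
  induction s with
  | nil => rfl
  | cons y ys ih =>
    by_cases hy : y = a
    · subst hy
      have h1 : PySem.Set.discard (y :: ys) y = PySem.Set.discard ys y := by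
        simp [PySem.Set.discard]
      rw [h1, ih, List.find?, ha]
    · have h1 : PySem.Set.discard (y :: ys) a = y :: PySem.Set.discard ys a := by
        simp [PySem.Set.discard, hy]
      rw [h1, List.find?, List.find?]
      cases p y
      · exact ih
      · rfl

-- the first match in set(l) (first-occurrence order) is the first match in l
theorem find?_ofList (p : Int → Bool) (l : List Int) :
    List.find? p (PySem.Set.ofList l) = List.find? p l := by
  induction l with
  | nil => rfl
  | cons x xs ih =>
    rw [PySem.Set.ofList_cons, List.find?, List.find?]
    cases hp : p x
    · rw [find?_discard p _ x hp, ih]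
    · rfl

theorem find?_congr_mem (p q : Int → Bool) (l : List Int) (h : ∀ x ∈ l, p x = q x) :
    List.find? p l = List.find? q l := by
  induction l with
  | nil => rfl
  | cons x xs ih =>
    have hx := h x (by simp)
    simp only [List.find?, hx]
    cases q x
    · exact ih fun y hy => h y (by simp [hy])
    · rfl

-- B's loop is find? of the common-membership predicate, given no seen element matches
theorem fcsAltGo_eq_find? (others : List (PySem.Set Int)) (xs : List Int) (seen : PySem.Set Int)
    (h : ∀ y ∈ seen, others.all (fun o => PySem.Set.contains o y) = false) :
    fcsAltGo others seen xs = xs.find? (fun x => others.all (fun o => PySem.Set.contains o x)) := by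
  induction xs generalizing seen with
  | nil => rfl
  | cons x xs ih =>
    rw [fcsAltGo]
    cases hx : PySem.Set.contains seen x with
    | true =>
      have hPx := h x ((PySem.Set.contains_iff seen x).mp hx)
      rw [List.find?_cons_of_neg (p := fun x => others.all (fun o => PySem.Set.contains o x))
        (by simpa using hPx), if_pos rfl]
      exact ih seen h
    | false =>
      rw [if_neg Bool.false_ne_true]
      cases hall : others.all (fun o => PySem.Set.contains o x) with
      | true =>
        rw [List.find?_cons_of_pos (p := fun x => others.all (fun o => PySem.Set.contains o x))
          hall, if_pos rfl]
      | false =>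
        rw [List.find?_cons_of_neg (p := fun x => others.all (fun o => PySem.Set.contains o x))
          (by simpa using hall), if_neg Bool.false_ne_true]
        exact ih _ (by
          intro y hy
          rcases (PySem.Set.mem_add seen x y).mp hy with hy | rfl
          · exact h y hy
          · exact hall)

theorem fcs_eq (sequences : List (List Int)) :
    find_common_element_sequences sequences = find_common_element_sequences_alt sequences := by
  cases sequences with
  | nil => rfl
  | cons first rest =>
    rw [find_common_element_sequences, find_common_element_sequences_alt]
    set d := (first :: rest).foldl
        (fun element_counts sequence =>
          (sequence.foldl
            (fun (st : PySem.Dict Int Int × PySem.Set Int) num =>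
              if PySem.Set.contains st.2 num then st
              else (st.1.insert num (st.1.getD num 0 + 1), PySem.Set.add st.2 num))
            (element_counts, PySem.Set.empty)).1)
        PySem.Dict.empty with hd
    have hkeys : d.keys = PySem.Set.ofList ((first :: rest).flatMap id) := by
      rw [hd, fcs_outer_keys, PySem.Dict.keys_empty, PySem.Set.update_nil_left]
    have hnd : d.keys.Nodup := by rw [hkeys]; exact PySem.Set.nodup_ofList _
    have hgd : ∀ x : Int, d.getD x 0 = ((first :: rest).countP (fun s => decide (x ∈ s)) : Int) := by
      intro x
      rw [hd, fcs_outer_getD, PySem.Dict.getD_empty, zero_add]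
    have hA : ∀ x : Int,
        ((d.getD x 0 == ((first :: rest).length : Int)) = true)
          ↔ (x ∈ first ∧ ∀ s ∈ rest, x ∈ s) := by
      intro x
      rw [hgd x, beq_iff_eq, Int.natCast_inj, List.countP_eq_length]
      simp
    have hB : ∀ x : Int,
        ((rest.map (fun s => PySem.Set.ofList s)).all
          (fun o => PySem.Set.contains o x) = true) ↔ (∀ s ∈ rest, x ∈ s) := by
      intro x
      simp [List.all_eq_true, PySem.Set.mem_ofList]
    rw [PySem.Dict.items_eq_map_keys d hnd 0, List.find?_map, Option.map_map]
    have hcomp : (Prod.fst ∘ fun k : Int => (k, d.getD k 0)) = id := rfl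
    rw [hcomp, Option.map_id]
    have hpred : ((fun p : Int × Int => p.2 == ((first :: rest).length : Int)) ∘
        (fun k : Int => (k, d.getD k 0))) = fun x : Int => d.getD x 0 == ((first :: rest).length : Int) := rfl
    rw [hpred, hkeys, find?_ofList, List.flatMap_cons, List.find?_append]
    simp only [id]
    rw [fcsAltGo_eq_find? _ first PySem.Set.empty (by intro y hy; simp [PySem.Set.empty] at hy)]
    have hcongr : List.find? (fun x : Int => d.getD x 0 == ((first :: rest).length : Int)) first
        = List.find? (fun x => (rest.map (fun s => PySem.Set.ofList s)).all
            (fun o => PySem.Set.contains o x)) first := by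
      apply find?_congr_mem
      intro x hx
      rw [Bool.eq_iff_iff, hA x, hB x]
      exact ⟨fun h => h.2, fun h => ⟨hx, h⟩⟩
    rw [hcongr]
    cases hfind : List.find? (fun x => (rest.map (fun s => PySem.Set.ofList s)).all
        (fun o => PySem.Set.contains o x)) first with
    | some a => rfl
    | none =>
      have hnone : List.find? (fun x : Int => d.getD x 0 == ((first :: rest).length : Int))
          (rest.flatMap id) = none := by
        rw [List.find?_eq_none]
        intro x hx hax
        have hmem := (hA x).mp hax
        have := List.find?_eq_none.mp hfind x hmem.1
        exact this ((hB x).mpr hmem.2)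
      rw [hnone]
      rfl

-- ===== VERDICT (by name: the statement is the Claim_ definition above) =====
theorem find_common_element_sequences_spec : Claim_equal_find_common_element_sequences := by
  intro sequences _
  unfold Spec_find_common_element_sequences
  exact fcs_eq sequences
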